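-- pv_equiv track=rewrite | github.com/lhchavez/postmortem | cfg.py | reverse_postorder
-- ===== SOURCE A (Python) =====
-- import collections
--
-- def reverse_postorder(blocks):
--     """Visit the block graph in reverse postorder.
--
--     This is useful to perform data-flow analysis on the block graph.
--     """
--
--     reverse_edges = collections.defaultdict(set)
--     order = []
--     seen = set()
--
--     def _visit(address):
--         if address in seen:
--             return
--         seen.add(address)
--         block = blocks[address]
--         for edge in block['edges']:
--             reverse_edges[edge['target']].add(address)
--             _visit(edge['target'])
--         order.append(address)
--
--     # Start the visiting on the first address of the function.
--     _visit(min(blocks.keys()))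
--
--     for address in order[::-1]:
--         yield (address, blocks[address], reverse_edges[address])
-- ===== SOURCE B (Python) =====
-- def reverse_postorder(blocks):
--     """Visit the block graph in reverse postorder (iterative DFS)."""
--     reverse_edges = {}
--     order = []
--     start = min(blocks.keys())
--     seen = {start}
--     stack = [(start, iter(blocks[start]['edges']))]
--     while stack:
--         address, edges = stack[-1]
--         for edge in edges:
--             target = edge['target']
--             reverse_edges.setdefault(target, set()).add(address)
--             if target not in seen:
--                 seen.add(target)
--                 stack.append((target, iter(blocks[target]['edges'])))
--                 break
--         else:
--             order.append(address)
--             stack.pop()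
--     for address in reversed(order):
--         yield (address, blocks[address], reverse_edges.get(address, set()))
-- ===== Notes on version B (the rewrite author's own statement) =====
-- stated objective: alternative
-- what changed: A's recursive closure _visit (mutating shared seen/order/reverse_edges) is replaced by an iterative DFS over an explicit stack of (address, remaining-edges) frames with a for/else scan, producing the identical postorder and reverse-edge sets without recursion.
import Mathlib
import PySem

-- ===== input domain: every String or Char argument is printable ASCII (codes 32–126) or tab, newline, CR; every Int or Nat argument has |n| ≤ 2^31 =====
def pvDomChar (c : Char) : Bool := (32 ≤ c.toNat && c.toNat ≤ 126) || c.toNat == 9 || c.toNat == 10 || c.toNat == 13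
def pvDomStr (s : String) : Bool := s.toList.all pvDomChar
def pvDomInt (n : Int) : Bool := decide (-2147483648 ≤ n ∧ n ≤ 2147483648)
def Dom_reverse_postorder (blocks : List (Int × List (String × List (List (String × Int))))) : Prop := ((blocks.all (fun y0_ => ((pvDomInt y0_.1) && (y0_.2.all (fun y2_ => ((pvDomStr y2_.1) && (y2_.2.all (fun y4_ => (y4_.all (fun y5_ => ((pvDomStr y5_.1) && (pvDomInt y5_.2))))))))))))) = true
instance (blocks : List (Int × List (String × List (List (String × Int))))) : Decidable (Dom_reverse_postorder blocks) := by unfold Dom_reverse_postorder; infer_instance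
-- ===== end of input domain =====

-- B replaces A's recursive closure `_visit` by an explicit-stack iterative DFS (same traversal, no
-- recursion); equivalence of the RETURN value is proved on Pre_ (objective: alternative, no speed claim).

-- Mutable state shared by A's closure: `seen` (a Python set), `reverse_edges` (defaultdict of sets,
-- modelled as a Dict whose values are PySem.Sets), `order` (a list).
structure PVSt where
  seen  : PySem.Set Int
  rev   : PySem.Dict Int (List Int)
  order : List Int
deriving DecidableEq, Repr

-- `reverse_edges[t].add(a)` on a defaultdict(set) / `reverse_edges.setdefault(t, set()).add(a)`:
-- both read the entry (creating an empty set at the end if absent) and add `a` to it in place.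
def pvRevAdd (rev : PySem.Dict Int (List Int)) (t a : Int) : PySem.Dict Int (List Int) :=
  rev.modify t [] (fun st => PySem.Set.add st a)

-- ===== PORT A =====
mutual
-- the recursive closure `_visit(address)`; fuel only totalizes the recursion (it never runs out on Pre_)
def pvVisitA (blocks : List (Int × List (String × List (List (String × Int))))) :
    Nat → Int → PVSt → Option PVSt
  | 0, _, _ => none
  | fuel+1, address, s =>
    if PySem.Set.contains s.seen address then some s
    else
      let s1 : PVSt := { s with seen := PySem.Set.add s.seen address }
      match (PySem.Dict.mk blocks).get? address with          -- blocks[address] (KeyError → none)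
      | none => none
      | some block =>
        match (PySem.Dict.mk block).get? "edges" with         -- block['edges'] (KeyError → none)
        | none => none
        | some edges =>
          match pvEdgesA blocks fuel address edges s1 with
          | none => none
          | some s2 => some { s2 with order := s2.order ++ [address] }
termination_by fuel _ _ => (fuel, 0)

-- the `for edge in block['edges']` loop inside `_visit`
def pvEdgesA (blocks : List (Int × List (String × List (List (String × Int))))) :
    Nat → Int → List (List (String × Int)) → PVSt → Option PVSt
  | _, _, [], s => some s
  | fuel, address, e :: rest, s =>
    match (PySem.Dict.mk e).get? "target" with                -- edge['target'] (KeyError → none)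
    | none => none
    | some t =>
      match pvVisitA blocks fuel t { s with rev := pvRevAdd s.rev t address } with
      | none => none
      | some s2 => pvEdgesA blocks fuel address rest s2
termination_by fuel _ es _ => (fuel, es.length + 1)
end

def reverse_postorder (blocks : List (Int × List (String × List (List (String × Int))))) :
    List (Int × (List (String × List (List (String × Int)))) × List Int) :=
  match PySem.List.min? (PySem.Dict.keys (PySem.Dict.mk blocks)) (fun k => k) with
  | none => []                                               -- min() of no keys: ValueError, outside Pre_
  | some start =>
    match pvVisitA blocks (blocks.length + 1) start ⟨[], PySem.Dict.mk [], []⟩ with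
    | none => []                                             -- KeyError during the walk, outside Pre_
    | some s =>
      -- `for address in order[::-1]: yield (address, blocks[address], reverse_edges[address])`
      -- (order[::-1] is the exact reverse; every yielded address was visited, so under Pre_ the
      --  getD defaults are never taken; reverse_edges[address] on the defaultdict is getD _ [])
      s.order.reverse.map (fun a =>
        (a, PySem.Dict.getD (PySem.Dict.mk blocks) a [], PySem.Dict.getD s.rev a []))

-- ===== PORT B =====
-- the `for edge in edges` scan of the top frame: rev-edge updates up to (and including) the first
-- unseen target, which is returned with the rest of the iterator; none = iterator exhausted
def pvScanB (address : Int) :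
    List (List (String × Int)) → PVSt → Option (PVSt × Option (Int × List (List (String × Int))))
  | [], s => some (s, none)
  | e :: rest, s =>
    match (PySem.Dict.mk e).get? "target" with                -- edge['target'] (KeyError → none)
    | none => none
    | some t =>
      let s1 : PVSt := { s with rev := pvRevAdd s.rev t address }
      if PySem.Set.contains s1.seen t then pvScanB address rest s1
      else some (s1, some (t, rest))

-- the `while stack:` loop; fuel only totalizes it (it never runs out on Pre_)
def pvLoopB (blocks : List (Int × List (String × List (List (String × Int))))) :
    Nat → List (Int × List (List (String × Int))) → PVSt → Option PVSt
  | _, [], s => some s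
  | 0, _ :: _, _ => none
  | fuel+1, (address, edges) :: rest, s =>
    match pvScanB address edges s with
    | none => none
    | some (s1, none) =>                                      -- for-else: append to order, pop the frame
      pvLoopB blocks fuel rest { s1 with order := s1.order ++ [address] }
    | some (s1, some (t, rem)) =>                             -- unseen target: mark seen, push its frame
      match (PySem.Dict.mk blocks).get? t with                -- blocks[target] (KeyError → none)
      | none => none
      | some tb =>
        match (PySem.Dict.mk tb).get? "edges" with            -- ['edges'] (KeyError → none)
        | none => none
        | some tEdges =>
          pvLoopB blocks fuel ((t, tEdges) :: (address, rem) :: rest)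
            { s1 with seen := PySem.Set.add s1.seen t }

def reverse_postorder_alt (blocks : List (Int × List (String × List (List (String × Int))))) :
    List (Int × (List (String × List (List (String × Int)))) × List Int) :=
  match PySem.List.min? (PySem.Dict.keys (PySem.Dict.mk blocks)) (fun k => k) with
  | none => []                                               -- min() of no keys: ValueError, outside Pre_
  | some start =>
    match (PySem.Dict.mk blocks).get? start with             -- blocks[start]
    | none => []
    | some b0 =>
      match (PySem.Dict.mk b0).get? "edges" with             -- ['edges']
      | none => []
      | some es0 =>
        match pvLoopB blocks (2 * blocks.length + 2) [(start, es0)]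
            ⟨PySem.Set.add [] start, PySem.Dict.mk [], []⟩ with
        | none => []
        | some s =>
          -- `for address in reversed(order): yield (address, blocks[address], reverse_edges.get(address, set()))`
          s.order.reverse.map (fun a =>
            (a, PySem.Dict.getD (PySem.Dict.mk blocks) a [], PySem.Dict.getD s.rev a []))

-- ===== PRECONDITION & SPEC =====
-- The block graph walked by A: out-neighbours of an address, and the set of addresses reachable
-- from min(blocks.keys()) (closure after |blocks|+1 rounds, enough for any path of distinct keys).
-- These describe the INPUT graph only; they are used by Pre_ below.
def pvTargets (blocks : List (Int × List (String × List (List (String × Int))))) (a : Int) : List Int :=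
  ((PySem.Dict.mk ((PySem.Dict.mk blocks).getD a [])).getD "edges" []).filterMap
    (fun e => (PySem.Dict.mk e).get? "target")

def pvReachStep (blocks : List (Int × List (String × List (List (String × Int))))) (R : PySem.Set Int) : PySem.Set Int :=
  PySem.Set.update R (R.flatMap (pvTargets blocks))

def pvReachN (blocks : List (Int × List (String × List (List (String × Int))))) : Nat → PySem.Set Int → PySem.Set Int
  | 0, R => R
  | n+1, R => pvReachN blocks n (pvReachStep blocks R)

def pvStart (blocks : List (Int × List (String × List (List (String × Int))))) : PySem.Set Int :=
  match PySem.List.min? (blocks.map Prod.fst) (fun k => k) with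
  | none => []
  | some m => PySem.Set.add [] m

def pvReach (blocks : List (Int × List (String × List (List (String × Int))))) : List Int :=
  pvReachN blocks (blocks.length + 1) (pvStart blocks)

-- Pre_ excludes exactly the inputs on which A raises (empty dict: ValueError from min(); a
-- REACHABLE block without an 'edges' entry, a reachable edge without a 'target' entry, or a
-- reachable target that is no key of blocks: KeyError) plus, Lean-side only, association lists
-- with duplicate keys in the output-relevant dicts (a Python dict cannot carry them, so first-
-- vs last-match lookup would be ambiguous); malformed UNREACHABLE blocks stay inside Pre_.
def Pre_reverse_postorder (blocks : List (Int × List (String × List (List (String × Int))))) : Prop :=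
  blocks ≠ [] ∧ (blocks.map Prod.fst).Nodup ∧
  ∀ a ∈ pvReach blocks,
    a ∈ blocks.map Prod.fst ∧
    ∀ block ∈ (PySem.Dict.mk blocks).get? a,
      (block.map Prod.fst).Nodup ∧
      (∀ p ∈ block, ∀ e ∈ p.2, (e.map Prod.fst).Nodup) ∧
      ((PySem.Dict.mk block).get? "edges").isSome = true ∧
      ∀ es ∈ (PySem.Dict.mk block).get? "edges", ∀ e ∈ es,
        ((PySem.Dict.mk e).get? "target").isSome = true
instance (blocks : List (Int × List (String × List (List (String × Int))))) : Decidable (Pre_reverse_postorder blocks) := by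
  unfold Pre_reverse_postorder; infer_instance

def pvWitness_reverse_postorder : (List (Int × List (String × List (List (String × Int))))) :=
  [(0, [("edges", [[("target", 1)], [("target", 0)]])]), (1, [("edges", [])])]

def Spec_reverse_postorder (blocks : List (Int × List (String × List (List (String × Int))))) (out : List (Int × (List (String × List (List (String × Int)))) × List Int)) : Prop := out = reverse_postorder_alt blocks
instance (blocks : List (Int × List (String × List (List (String × Int))))) (out : List (Int × (List (String × List (List (String × Int)))) × List Int)) : Decidable (Spec_reverse_postorder blocks out) := by
  unfold Spec_reverse_postorder
  -- plain infer_instance diverges on this deeply nested product type; give the List/Prod instances explicitly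
  exact @instDecidableEqList _
    (fun p q => @instDecidableEqProd _ _ Int.instDecidableEq
      (fun a b => @instDecidableEqProd _ _ (fun u v => instDecidableEqList u v) (fun u v => instDecidableEqList u v) a b) p q)
    out (reverse_postorder_alt blocks)

-- ===== CLAIM (what is proved, stated in full; the proofs are below) =====
def Claim_equal_reverse_postorder : Prop := ∀ (blocks : List (Int × List (String × List (List (String × Int))))), Dom_reverse_postorder blocks → Pre_reverse_postorder blocks → Spec_reverse_postorder blocks (reverse_postorder blocks)

-- ===== LEMMAS AND PROOFS =====

-- Abbreviation-free helpers used only by the proofs (kept below the claim block).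

-- the keys a walk may visit
def pvKeys (blocks : List (Int × List (String × List (List (String × Int))))) : List Int :=
  blocks.map Prod.fst

-- well-formed edge dict of the block at (reachable) address a: it has a 'target', and that
-- target is an out-neighbour of a
def PVEdgeOKr (blocks : List (Int × List (String × List (List (String × Int))))) (a : Int) (e : List (String × Int)) : Prop :=
  ∃ t, (PySem.Dict.mk e).get? "target" = some t ∧ t ∈ pvTargets blocks a

-- what Pre_ guarantees at a reachable address: its block and edge list exist, each edge well formed
def PVCond (blocks : List (Int × List (String × List (List (String × Int))))) (a : Int) : Prop :=
  ∃ block es, (PySem.Dict.mk blocks).get? a = some block ∧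
    (PySem.Dict.mk block).get? "edges" = some es ∧ ∀ e ∈ es, PVEdgeOKr blocks a e

-- invariant of the `seen` set: distinct addresses, all keys of blocks
def PVGood (blocks : List (Int × List (String × List (List (String × Int))))) (s : PVSt) : Prop :=
  s.seen.Nodup ∧ ∀ x ∈ s.seen, x ∈ pvKeys blocks

-- Big-step behaviour of A's `_visit` (mode `none`) and of its inner `for edge` loop over a
-- remaining edge list (mode `some es`), as one (non-mutual) inductive relation on states.
inductive PVR (blocks : List (Int × List (String × List (List (String × Int))))) :
    Int × Option (List (List (String × Int))) → PVSt → PVSt → Prop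
  | seen : ∀ a s, PySem.Set.contains s.seen a = true → PVR blocks (a, none) s s
  | visit : ∀ a s block edges s2,
      PySem.Set.contains s.seen a = false →
      (PySem.Dict.mk blocks).get? a = some block →
      (PySem.Dict.mk block).get? "edges" = some edges →
      PVR blocks (a, some edges) { s with seen := PySem.Set.add s.seen a } s2 →
      PVR blocks (a, none) s { s2 with order := s2.order ++ [a] }
  | nil : ∀ a s, PVR blocks (a, some []) s s
  | cons : ∀ a e rest s t s2 s3,
      (PySem.Dict.mk e).get? "target" = some t →
      PVR blocks (t, none) { s with rev := pvRevAdd s.rev t a } s2 →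
      PVR blocks (a, some rest) s2 s3 →
      PVR blocks (a, some (e :: rest)) s s3

-- Big-step behaviour of B's `while stack:` loop: run the frames of the stack in order.
inductive PVRunR (blocks : List (Int × List (String × List (List (String × Int))))) :
    List (Int × List (List (String × Int))) → PVSt → PVSt → Prop
  | nil : ∀ s, PVRunR blocks [] s s
  | cons : ∀ a es rest s s1 s2,
      PVR blocks (a, some es) s s1 →
      PVRunR blocks rest { s1 with order := s1.order ++ [a] } s2 →
      PVRunR blocks ((a, es) :: rest) s s2

-- ---- generic small facts ----

theorem pvGood_len {blocks : List (Int × List (String × List (List (String × Int))))} {s : PVSt}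
    (h : PVGood blocks s) : s.seen.length ≤ blocks.length := by
  have h1 : s.seen.length = s.seen.toFinset.card := (List.toFinset_card_of_nodup h.1).symm
  have h2 : s.seen.toFinset ⊆ (pvKeys blocks).toFinset := by
    intro x hx; simp only [List.mem_toFinset] at *; exact h.2 x hx
  calc s.seen.length = s.seen.toFinset.card := h1
    _ ≤ (pvKeys blocks).toFinset.card := Finset.card_le_card h2
    _ ≤ (pvKeys blocks).length := List.toFinset_card_le _
    _ = blocks.length := List.length_map ..

theorem pvGood_add {blocks : List (Int × List (String × List (List (String × Int))))} {s : PVSt}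
    {t : Int} (h : PVGood blocks s) (ht : t ∈ pvKeys blocks)
    (hc : PySem.Set.contains s.seen t = false) :
    PVGood blocks { s with seen := PySem.Set.add s.seen t } ∧
      (PySem.Set.add s.seen t).length = s.seen.length + 1 := by
  have hnm : t ∉ s.seen := by
    intro hm
    have h2 := (PySem.Set.contains_iff s.seen t).mpr hm
    rw [hc] at h2; cases h2
  refine ⟨⟨PySem.Set.nodup_add _ _ h.1, ?_⟩, by simp [PySem.Set.add_of_not_mem hnm]⟩
  intro x hx
  rw [PySem.Set.mem_add] at hx
  rcases hx with hx | rfl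
  · exact h.2 x hx
  · exact ht

theorem pv_some_mem_keys {blocks : List (Int × List (String × List (List (String × Int))))}
    {a : Int} {b : List (String × List (List (String × Int)))}
    (hb : (PySem.Dict.mk blocks).get? a = some b) : a ∈ pvKeys blocks :=
  PySem.Dict.mem_keys_of_mem_items _ (PySem.Dict.mem_items_of_get?_eq_some _ hb)

theorem pvReachStep_sub {blocks : List (Int × List (String × List (List (String × Int))))}
    {R : PySem.Set Int} : ∀ x ∈ R, x ∈ pvReachStep blocks R := by
  intro x hx
  rw [pvReachStep, PySem.Set.mem_update]
  exact Or.inl hx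

theorem pvReachStep_mono {blocks : List (Int × List (String × List (List (String × Int))))}
    {R R' : PySem.Set Int} (h : ∀ x ∈ R, x ∈ R') :
    ∀ x ∈ pvReachStep blocks R, x ∈ pvReachStep blocks R' := by
  intro x hx
  rw [pvReachStep, PySem.Set.mem_update] at hx ⊢
  rcases hx with hx | hx
  · exact Or.inl (h x hx)
  · rw [List.mem_flatMap] at hx ⊢
    obtain ⟨a, ha, hxa⟩ := hx
    exact Or.inr ⟨a, h a ha, hxa⟩

theorem pvReachN_mono_set {blocks : List (Int × List (String × List (List (String × Int))))} :
    ∀ (n : Nat) (R R' : PySem.Set Int), (∀ x ∈ R, x ∈ R') →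
      ∀ x ∈ pvReachN blocks n R, x ∈ pvReachN blocks n R' := by
  intro n
  induction n with
  | zero => intro R R' h x hx; exact h x hx
  | succ n ih =>
    intro R R' h x hx
    rw [pvReachN] at hx ⊢
    exact ih _ _ (pvReachStep_mono h) x hx

theorem pvReachN_mono_idx {blocks : List (Int × List (String × List (List (String × Int))))}
    {i j : Nat} (hij : i ≤ j) {R : PySem.Set Int} :
    ∀ x ∈ pvReachN blocks i R, x ∈ pvReachN blocks j R := by
  induction j with
  | zero => rw [Nat.le_zero.mp hij]; intro x hx; exact hx
  | succ j ihj =>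
    rcases Nat.lt_or_ge i (j+1) with hlt | hge
    · intro x hx
      have hx' := ihj (Nat.lt_succ_iff.mp hlt) x hx
      rw [pvReachN]
      exact pvReachN_mono_set j R (pvReachStep blocks R) pvReachStep_sub x hx'
    · rw [Nat.le_antisymm hij hge]
      intro x hx; exact hx

theorem pvReachN_step {blocks : List (Int × List (String × List (List (String × Int))))}
    {a t : Int} : ∀ {n : Nat} {R : PySem.Set Int}, a ∈ pvReachN blocks n R →
      t ∈ pvTargets blocks a → t ∈ pvReachN blocks (n + 1) R := by
  intro n
  induction n with
  | zero =>
    intro R ha ht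
    show t ∈ pvReachN blocks 0 (pvReachStep blocks R)
    rw [pvReachN, pvReachStep, PySem.Set.mem_update, List.mem_flatMap]
    exact Or.inr ⟨a, ha, ht⟩
  | succ n ih =>
    intro R ha ht
    rw [pvReachN] at ha
    show t ∈ pvReachN blocks (n + 1 + 1) R
    rw [pvReachN]
    exact ih ha ht

theorem pv_cond {blocks : List (Int × List (String × List (List (String × Int))))}
    {a : Int} {k : Nat} (hpre : Pre_reverse_postorder blocks)
    (ha : a ∈ pvReachN blocks k (pvStart blocks)) (hk : k ≤ blocks.length + 1) :
    PVCond blocks a := by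
  have hM : a ∈ pvReach blocks := by
    rw [pvReach]
    exact pvReachN_mono_idx hk a ha
  obtain ⟨hak, hcond⟩ := hpre.2.2 a hM
  obtain ⟨block, hb⟩ : ∃ b, (PySem.Dict.mk blocks).get? a = some b := by
    cases hg : (PySem.Dict.mk blocks).get? a with
    | some b => exact ⟨b, rfl⟩
    | none =>
      rw [PySem.Dict.get?_eq_none_iff_not_mem_keys] at hg
      exact absurd hak hg
  obtain ⟨-, -, hesSome, hper⟩ := hcond block hb
  obtain ⟨es, hes⟩ := Option.isSome_iff_exists.mp hesSome
  refine ⟨block, es, hb, hes, ?_⟩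
  intro e he
  obtain ⟨t, htg⟩ := Option.isSome_iff_exists.mp (hper es hes e he)
  refine ⟨t, htg, ?_⟩
  have h1 : (PySem.Dict.mk blocks).getD a [] = block := PySem.Dict.getD_of_get?_eq_some _ _ hb
  have h2 : (PySem.Dict.mk block).getD "edges" [] = es := PySem.Dict.getD_of_get?_eq_some _ _ hes
  rw [pvTargets, h1, h2, List.mem_filterMap]
  exact ⟨e, he, htg⟩

theorem pvEdgesA_sound {blocks : List (Int × List (String × List (List (String × Int))))} :
    ∀ (es : List (List (String × Int))) (n : Nat) (a : Int) (s s' : PVSt),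
      (∀ t u u', pvVisitA blocks n t u = some u' → PVR blocks (t, none) u u') →
      pvEdgesA blocks n a es s = some s' → PVR blocks (a, some es) s s' := by
  intro es
  induction es with
  | nil =>
    intro n a s s' _ h
    simp only [pvEdgesA, Option.some.injEq] at h
    subst h
    exact PVR.nil a s
  | cons e rest ih =>
    intro n a s s' hvis h
    rw [pvEdgesA] at h
    split at h
    · cases h
    · rename_i t htg
      split at h
      · cases h
      · rename_i s2 hv
        exact PVR.cons a e rest s t s2 s' htg (hvis t _ _ hv) (ih n a s2 s' hvis h)

theorem pvVisitA_sound {blocks : List (Int × List (String × List (List (String × Int))))} :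
    ∀ (n : Nat) (a : Int) (s s' : PVSt),
      pvVisitA blocks n a s = some s' → PVR blocks (a, none) s s' := by
  intro n
  induction n with
  | zero => intro a s s' h; rw [pvVisitA] at h; cases h
  | succ n ih =>
    intro a s s' h
    rw [pvVisitA] at h
    by_cases hc : PySem.Set.contains s.seen a = true
    · rw [if_pos hc] at h
      cases h
      exact PVR.seen a s hc
    · rw [if_neg hc] at h
      rw [Bool.not_eq_true] at hc
      split at h
      · cases h
      · rename_i block hb
        split at h
        · cases h
        · rename_i edges he
          dsimp only at h
          split at h
          · cases h
          · rename_i s2 hE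
            cases h
            exact PVR.visit a s block edges s2 hc hb he
              (pvEdgesA_sound edges n a _ s2 ih hE)

theorem pvEdgesA_total {blocks : List (Int × List (String × List (List (String × Int))))}
    {n : Nat}
    (hvis : ∀ t u, t ∈ pvReachN blocks (u.seen.length + 1) (pvStart blocks) → PVGood blocks u →
      blocks.length + 1 ≤ u.seen.length + n →
      ∃ u', pvVisitA blocks n t u = some u' ∧ PVGood blocks u' ∧ u.seen.length ≤ u'.seen.length) :
    ∀ (es : List (List (String × Int))) (a : Int) (s : PVSt),
      PVGood blocks s → a ∈ pvReachN blocks s.seen.length (pvStart blocks) →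
      (∀ e ∈ es, PVEdgeOKr blocks a e) →
      blocks.length + 1 ≤ s.seen.length + n →
      ∃ s', pvEdgesA blocks n a es s = some s' ∧ PVGood blocks s' ∧ s.seen.length ≤ s'.seen.length := by
  intro es
  induction es with
  | nil =>
    intro a s hg _ _ _
    exact ⟨s, by rw [pvEdgesA], hg, le_refl _⟩
  | cons e rest ih =>
    intro a s hg ha hok hlen
    obtain ⟨t, htg, htt⟩ := hok e (List.mem_cons_self ..)
    have hg1 : PVGood blocks { s with rev := pvRevAdd s.rev t a } := hg
    have htR : t ∈ pvReachN blocks (s.seen.length + 1) (pvStart blocks) :=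
      pvReachN_step ha htt
    obtain ⟨s2, hv, hg2, hle2⟩ := hvis t { s with rev := pvRevAdd s.rev t a } htR hg1 hlen
    dsimp only at hle2
    obtain ⟨s3, hE, hg3, hle3⟩ :=
      ih a s2 hg2 (pvReachN_mono_idx hle2 a ha)
        (fun e' he' => hok e' (List.mem_cons_of_mem _ he')) (by omega)
    refine ⟨s3, ?_, hg3, by omega⟩
    rw [pvEdgesA, htg]
    dsimp only
    rw [hv]
    dsimp only
    exact hE

theorem pvVisitA_total {blocks : List (Int × List (String × List (List (String × Int))))}
    (hpre : Pre_reverse_postorder blocks) :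
    ∀ (n : Nat) (a : Int) (s : PVSt),
      a ∈ pvReachN blocks (s.seen.length + 1) (pvStart blocks) → PVGood blocks s →
      blocks.length + 1 ≤ s.seen.length + n →
      ∃ s', pvVisitA blocks n a s = some s' ∧ PVGood blocks s' ∧ s.seen.length ≤ s'.seen.length := by
  intro n
  induction n with
  | zero =>
    intro a s _ hg hlen
    have := pvGood_len hg
    omega
  | succ n ih =>
    intro a s ha hg hlen
    by_cases hc : PySem.Set.contains s.seen a = true
    · exact ⟨s, by rw [pvVisitA, if_pos hc], hg, le_refl _⟩
    · rw [Bool.not_eq_true] at hc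
      obtain ⟨block, es, hb, he, hoks⟩ :=
        pv_cond hpre ha (by have := pvGood_len hg; omega)
      have hak : a ∈ pvKeys blocks := pv_some_mem_keys hb
      obtain ⟨hg1, hlen1⟩ := pvGood_add hg hak hc
      obtain ⟨s2, hE, hg2, hle⟩ :=
        pvEdgesA_total (n := n) ih es a { s with seen := PySem.Set.add s.seen a } hg1
          (by dsimp only; rw [hlen1]; exact ha) hoks (by dsimp only at hlen1 ⊢; omega)
      refine ⟨{ s2 with order := s2.order ++ [a] }, ?_, hg2, ?_⟩
      · rw [pvVisitA, if_neg (by rw [hc]; exact Bool.false_ne_true), hb]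
        dsimp only
        rw [he]
        dsimp only
        rw [hE]
      · dsimp only at hlen1 hle ⊢
        omega

-- ---- determinism of the big-step relation ----

theorem pvR_det {blocks : List (Int × List (String × List (List (String × Int))))}
    {m : Int × Option (List (List (String × Int)))} {s s1 : PVSt}
    (h : PVR blocks m s s1) : ∀ s2, PVR blocks m s s2 → s1 = s2 := by
  induction h with
  | seen a s hc =>
    intro s2 h2
    cases h2
    case seen => rfl
    case visit =>
      rename_i block2 edges2 s5 he2 hb2 hc2 hrec2
      exact absurd hc (by rw [hc2]; exact Bool.false_ne_true)
  | visit a s block edges s2' hc hb he hrec ih =>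
    intro s4 h2
    cases h2
    case seen =>
      rename_i hc2
      exact absurd hc2 (by rw [hc]; exact Bool.false_ne_true)
    case visit =>
      rename_i block2 edges2 s5 he2 hb2 hc2 hrec2
      rw [hb] at hb2
      injection hb2 with hbe
      subst hbe
      rw [he] at he2
      injection he2 with hee
      subst hee
      have h5 := ih s5 hrec2
      subst h5
      rfl
  | nil a s =>
    intro s2 h2
    cases h2
    rfl
  | cons a e rest s t s2' s3 htg hv hr ihv ihr =>
    intro s4 h2
    cases h2
    case cons =>
      rename_i t2 s5 htg2 hv2 hr2
      rw [htg] at htg2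
      injection htg2 with hte
      subst hte
      have h5 := ihv s5 hv2
      subst h5
      exact ihr s4 hr2

-- ---- B side: soundness and totality ----

theorem pvScanB_sound_none {blocks : List (Int × List (String × List (List (String × Int))))} :
    ∀ (es : List (List (String × Int))) (a : Int) (s s1 : PVSt),
      pvScanB a es s = some (s1, none) → PVR blocks (a, some es) s s1 := by
  intro es
  induction es with
  | nil =>
    intro a s s1 h
    rw [pvScanB] at h
    injection h with h
    injection h with h1 h2
    subst h1
    exact PVR.nil a s
  | cons e rest ih =>
    intro a s s1 h
    rw [pvScanB] at h
    split at h
    · cases h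
    · rename_i t htg
      dsimp only at h
      split at h
      · rename_i hct
        exact PVR.cons a e rest s t _ s1 htg (PVR.seen t _ hct) (ih a _ s1 h)
      · simp at h

theorem pvScanB_sound_push {blocks : List (Int × List (String × List (List (String × Int))))} :
    ∀ (es : List (List (String × Int))) (a : Int) (s s1 : PVSt) (t : Int)
      (rem : List (List (String × Int))),
      pvScanB a es s = some (s1, some (t, rem)) →
      PySem.Set.contains s1.seen t = false ∧ s1.seen = s.seen ∧
      ∀ s2 s3, PVR blocks (t, none) s1 s2 → PVR blocks (a, some rem) s2 s3 →
        PVR blocks (a, some es) s s3 := by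
  intro es
  induction es with
  | nil =>
    intro a s s1 t rem h
    rw [pvScanB] at h
    injection h with h
    injection h with h1 h2
    cases h2
  | cons e rest ih =>
    intro a s s1 t rem h
    rw [pvScanB] at h
    split at h
    · cases h
    · rename_i t' htg
      dsimp only at h
      split at h
      · rename_i hct'
        obtain ⟨h1, h2, h3⟩ := ih a _ s1 t rem h
        refine ⟨h1, h2, ?_⟩
        intro s2 s3 hv hr
        exact PVR.cons a e rest s t' _ s3 htg (PVR.seen t' _ hct') (h3 s2 s3 hv hr)
      · rename_i hct'
        injection h with h
        rw [Prod.mk.injEq, Option.some.injEq, Prod.mk.injEq] at h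
        obtain ⟨h1, h2a, h2b⟩ := h
        subst h1
        subst h2b
        cases h2a
        rw [Bool.not_eq_true] at hct'
        refine ⟨hct', rfl, ?_⟩
        intro s2 s3 hv hr
        exact PVR.cons a e rest s t s2 s3 htg hv hr

theorem pvScanB_total {blocks : List (Int × List (String × List (List (String × Int))))} :
    ∀ (es : List (List (String × Int))) (a : Int) (s : PVSt),
      (∀ e ∈ es, PVEdgeOKr blocks a e) →
      ∃ s1 o, pvScanB a es s = some (s1, o) ∧ s1.seen = s.seen ∧
        ∀ t rem, o = some (t, rem) →
          t ∈ pvTargets blocks a ∧ PySem.Set.contains s1.seen t = false ∧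
            ∀ e ∈ rem, PVEdgeOKr blocks a e := by
  intro es
  induction es with
  | nil =>
    intro a s _
    exact ⟨s, none, by rw [pvScanB], rfl, by intro t rem h; cases h⟩
  | cons e rest ih =>
    intro a s hok
    obtain ⟨t, htg, htt⟩ := hok e (List.mem_cons_self ..)
    by_cases hct : PySem.Set.contains s.seen t = true
    · obtain ⟨s1, o, hsc, hseq, himp⟩ :=
        ih a { s with rev := pvRevAdd s.rev t a } (fun e' he' => hok e' (List.mem_cons_of_mem _ he'))
      refine ⟨s1, o, ?_, hseq, himp⟩
      rw [pvScanB, htg]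
      dsimp only
      rw [if_pos hct]
      exact hsc
    · rw [Bool.not_eq_true] at hct
      refine ⟨{ s with rev := pvRevAdd s.rev t a }, some (t, rest), ?_, rfl, ?_⟩
      · rw [pvScanB, htg]
        dsimp only
        rw [if_neg (by rw [hct]; exact Bool.false_ne_true)]
      · intro t' rem' heq
        injection heq with heq
        injection heq with h1 h2
        subst h1; subst h2
        exact ⟨htt, hct, fun e' he' => hok e' (List.mem_cons_of_mem _ he')⟩

theorem pvLoopB_sound {blocks : List (Int × List (String × List (List (String × Int))))} :
    ∀ (n : Nat) (stack : List (Int × List (List (String × Int)))) (s s' : PVSt),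
      pvLoopB blocks n stack s = some s' → PVRunR blocks stack s s' := by
  intro n
  induction n with
  | zero =>
    intro stack s s' h
    cases stack with
    | nil =>
      rw [pvLoopB] at h
      injection h with h
      subst h
      exact PVRunR.nil s
    | cons f rest => rw [pvLoopB] at h; cases h
  | succ n ih =>
    intro stack s s' h
    cases stack with
    | nil =>
      rw [pvLoopB] at h
      injection h with h
      subst h
      exact PVRunR.nil s
    | cons f rest =>
      obtain ⟨a, es⟩ := f
      rw [pvLoopB] at h
      split at h
      · cases h
      · rename_i s1 hsc
        exact PVRunR.cons a es rest s s1 s' (pvScanB_sound_none es a s s1 hsc) (ih rest _ s' h)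
      · rename_i s1 t rem hsc
        split at h
        · cases h
        · rename_i tb hbt
          split at h
          · cases h
          · rename_i tEdges het
            have hrun := ih _ _ s' h
            cases hrun with
            | cons _ _ _ _ sP _ hEt hrest2 =>
              cases hrest2 with
              | cons _ _ _ _ sQ _ hErem hrest3 =>
                obtain ⟨hct, hseq, hcomp⟩ := pvScanB_sound_push es a s s1 t rem hsc
                have hv : PVR blocks (t, none) s1 { sP with order := sP.order ++ [t] } :=
                  PVR.visit t s1 tb tEdges sP hct hbt het hEt
                exact PVRunR.cons a es rest s sQ s' (hcomp _ _ hv hErem) hrest3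

theorem pvLoopB_total {blocks : List (Int × List (String × List (List (String × Int))))}
    (hpre : Pre_reverse_postorder blocks) :
    ∀ (n : Nat) (stack : List (Int × List (List (String × Int)))) (s : PVSt),
      PVGood blocks s →
      (∀ f ∈ stack, f.1 ∈ pvReachN blocks s.seen.length (pvStart blocks) ∧
        ∀ e ∈ f.2, PVEdgeOKr blocks f.1 e) →
      stack.length + 2 * blocks.length + 1 ≤ n + 2 * s.seen.length →
      ∃ s', pvLoopB blocks n stack s = some s' := by
  intro n
  induction n with
  | zero =>
    intro stack s hg _ hlen
    cases stack with
    | nil => exact ⟨s, by rw [pvLoopB]⟩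
    | cons f rest =>
      have := pvGood_len hg
      simp only [List.length_cons] at hlen
      omega
  | succ n ih =>
    intro stack s hg hstack hlen
    cases stack with
    | nil => exact ⟨s, by rw [pvLoopB]⟩
    | cons f rest =>
      obtain ⟨a, es⟩ := f
      obtain ⟨haR, hok⟩ := hstack (a, es) (List.mem_cons_self ..)
      obtain ⟨s1, o, hsc, hseq, himp⟩ := pvScanB_total es a s hok
      cases o with
      | none =>
        obtain ⟨s', h'⟩ := ih rest { s1 with order := s1.order ++ [a] }
          (by dsimp only [PVGood]; rw [hseq]; exact hg)
          (by
            intro f hf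
            have h2 := hstack f (List.mem_cons_of_mem _ hf)
            dsimp only
            rw [hseq]
            exact h2)
          (by dsimp only; rw [hseq]; simp only [List.length_cons] at hlen; omega)
        refine ⟨s', ?_⟩
        rw [pvLoopB]
        rw [hsc]
        exact h'
      | some p =>
        obtain ⟨t, rem⟩ := p
        obtain ⟨htt, hct, hremok⟩ := himp t rem rfl
        have htR : t ∈ pvReachN blocks (s.seen.length + 1) (pvStart blocks) :=
          pvReachN_step haR htt
        obtain ⟨tb, tEdges, hbt, het, hoks⟩ :=
          pv_cond hpre htR (by have := pvGood_len hg; omega)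
        have htk : t ∈ pvKeys blocks := pv_some_mem_keys hbt
        have hg1 : PVGood blocks s1 := by dsimp only [PVGood]; rw [hseq]; exact hg
        obtain ⟨hg2, hlen2⟩ := pvGood_add hg1 htk hct
        obtain ⟨s', h'⟩ := ih ((t, tEdges) :: (a, rem) :: rest)
          { s1 with seen := PySem.Set.add s1.seen t }
          hg2
          (by
            intro f hf
            have hlen1 : ({ s1 with seen := PySem.Set.add s1.seen t } : PVSt).seen.length
                = s.seen.length + 1 := by
              dsimp only
              rw [hlen2, hseq]
            rcases List.mem_cons.mp hf with rfl | hf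
            · refine ⟨?_, hoks⟩
              rw [hlen1]
              exact htR
            rcases List.mem_cons.mp hf with rfl | hf
            · refine ⟨?_, hremok⟩
              rw [hlen1]
              exact pvReachN_mono_idx (Nat.le_succ _) a haR
            · obtain ⟨hfR, hfok⟩ := hstack f (List.mem_cons_of_mem _ hf)
              refine ⟨?_, hfok⟩
              rw [hlen1]
              exact pvReachN_mono_idx (Nat.le_succ _) f.1 hfR)
          (by
            dsimp only
            rw [hlen2, hseq]
            simp only [List.length_cons] at hlen ⊢
            omega)
        refine ⟨s', ?_⟩
        rw [pvLoopB, hsc]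
        dsimp only
        rw [hbt]
        dsimp only
        rw [het]
        dsimp only
        exact h'

-- ===== VERDICT (by name: the statement is the Claim_ definition above) =====
theorem reverse_postorder_spec : Claim_equal_reverse_postorder := by
  intro blocks _ hpre
  unfold Spec_reverse_postorder
  cases hmin : PySem.List.min? (PySem.Dict.keys (PySem.Dict.mk blocks)) (fun k => k) with
  | none =>
    rw [PySem.List.min?_eq_none_iff] at hmin
    exact absurd (show blocks = [] from by
      have h0 : blocks.map Prod.fst = [] := hmin
      exact List.map_eq_nil_iff.mp h0) hpre.1
  | some start =>
    have hmin' : PySem.List.min? (blocks.map Prod.fst) (fun k => k) = some start := hmin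
    have haddnil : PySem.Set.add ([] : List Int) start = [start] := rfl
    have hstart0 : start ∈ pvStart blocks := by
      rw [pvStart, hmin']
      dsimp only
      rw [haddnil]
      exact List.mem_singleton.mpr rfl
    have hstart1 : ∀ k, 1 ≤ k → start ∈ pvReachN blocks k (pvStart blocks) := by
      intro k hk
      exact pvReachN_mono_idx (Nat.le_trans (Nat.le_refl 1) hk)
        start (show start ∈ pvReachN blocks 1 (pvStart blocks) from
          pvReachN_mono_idx (Nat.zero_le 1) start hstart0)
    obtain ⟨b0, es0, hb0, hes0, hoks0⟩ :=
      pv_cond hpre (hstart1 1 (le_refl 1)) (by omega)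
    have hg0 : PVGood blocks (⟨[], PySem.Dict.mk [], []⟩ : PVSt) :=
      ⟨List.nodup_nil, by intro x hx; cases hx⟩
    obtain ⟨sA, hA, -, -⟩ := pvVisitA_total hpre (blocks.length + 1) start ⟨[], PySem.Dict.mk [], []⟩
      (hstart1 1 (le_refl 1)) hg0 (by dsimp only; omega)
    have hRA : PVR blocks (start, none) ⟨[], PySem.Dict.mk [], []⟩ sA :=
      pvVisitA_sound _ start _ sA hA
    have hg0B : PVGood blocks (⟨PySem.Set.add [] start, PySem.Dict.mk [], []⟩ : PVSt) := by
      refine ⟨?_, ?_⟩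
      · rw [haddnil]; exact List.nodup_singleton start
      · intro x hx
        rw [haddnil] at hx
        rcases List.mem_singleton.mp hx with rfl
        exact pv_some_mem_keys hb0
    obtain ⟨sB, hB⟩ := pvLoopB_total hpre (2 * blocks.length + 2) [(start, es0)]
      ⟨PySem.Set.add [] start, PySem.Dict.mk [], []⟩ hg0B
      (by
        intro f hf
        rcases List.mem_singleton.mp hf with rfl
        refine ⟨?_, hoks0⟩
        dsimp only
        rw [haddnil]
        exact hstart1 1 (le_refl 1))
      (by dsimp only; rw [haddnil]; simp; omega)
    have hRB : PVRunR blocks [(start, es0)] ⟨PySem.Set.add [] start, PySem.Dict.mk [], []⟩ sB :=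
      pvLoopB_sound _ _ _ sB hB
    cases hRB with
    | cons _ _ _ _ sP _ hEs hrest =>
      cases hrest with
      | nil =>
        have hvB : PVR blocks (start, none) ⟨[], PySem.Dict.mk [], []⟩
            { sP with order := sP.order ++ [start] } :=
          PVR.visit start ⟨[], PySem.Dict.mk [], []⟩ b0 es0 sP rfl hb0 hes0 hEs
        have hAB := pvR_det hRA _ hvB
        rw [reverse_postorder, reverse_postorder_alt, hmin]
        dsimp only
        rw [hA, hb0]
        dsimp only
        rw [hes0]
        dsimp only
        rw [hB]
        dsimp only
        rw [hAB]
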